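-- pv_equiv track=rewrite | github.com/jyothivedurada/KaggleDocGen | Scripts/split_cell.py | combine_multiple_empty_lines_to_one
-- ===== SOURCE A (Python) =====
-- def combine_multiple_empty_lines_to_one(clusters):
--     new_clusters = []
--     for cluster_number in range(len(clusters)):
--         if(len(clusters[cluster_number][0].strip()) != 0):
--             new_clusters.append(clusters[cluster_number])
--         else:
--             if len(new_clusters) == 0 or len(new_clusters[-1][0].strip()) == 0:
--                 pass
--             else:
--                 new_clusters.append(clusters[cluster_number])
--     return new_clusters
-- ===== SOURCE B (Python) =====
-- def combine_multiple_empty_lines_to_one(clusters):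
--     result = []
--     i = 0
--     n = len(clusters)
--     while i < n:
--         empty = len(clusters[i][0].strip()) == 0
--         j = i + 1
--         while j < n and (len(clusters[j][0].strip()) == 0) == empty:
--             j += 1
--         if empty:
--             if result:
--                 result.append(clusters[i])
--         else:
--             result.extend(clusters[i:j])
--         i = j
--     return result
-- ===== Notes on version B (the rewrite author's own statement) =====
-- stated objective: alternative
-- what changed: B scans the input as maximal runs of empty/non-empty clusters with a two-pointer scan, emitting whole non-empty runs and only the first cluster of each non-leading empty run, instead of A's per-element pass that re-inspects the last appended cluster.
import Mathlib
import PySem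

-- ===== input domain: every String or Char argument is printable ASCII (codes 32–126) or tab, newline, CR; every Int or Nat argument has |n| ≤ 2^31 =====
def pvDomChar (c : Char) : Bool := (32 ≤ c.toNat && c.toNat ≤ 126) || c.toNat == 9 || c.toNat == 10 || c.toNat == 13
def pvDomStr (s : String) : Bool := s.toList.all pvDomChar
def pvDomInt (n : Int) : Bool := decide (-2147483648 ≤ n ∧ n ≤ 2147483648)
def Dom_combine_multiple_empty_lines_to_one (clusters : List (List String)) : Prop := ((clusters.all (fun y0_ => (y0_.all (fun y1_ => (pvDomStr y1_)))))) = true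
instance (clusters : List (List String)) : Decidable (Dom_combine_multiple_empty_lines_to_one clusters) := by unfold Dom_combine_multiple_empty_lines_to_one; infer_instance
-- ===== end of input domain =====

-- B replaces A's per-element pass (which re-inspects the last appended cluster) by a
-- two-pointer scan over maximal runs of empty/non-empty clusters; objective: alternative.

-- ===== PORT A =====
-- the first line of each cluster exists for every input admitted by Pre_, so headD "" is exact there
def combine_multiple_empty_lines_to_one (clusters : List (List String)) : List (List String) :=
  clusters.foldl
    (fun new_clusters cluster =>
      if (PySem.Str.strip (cluster.headD "")).length != 0 then
        new_clusters ++ [cluster]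
      else
        if new_clusters.isEmpty || ((PySem.Str.strip (((new_clusters.getLast?).getD []).headD "")).length == 0) then
          new_clusters
        else
          new_clusters ++ [cluster]) []

-- ===== PORT B =====
-- Source B's `len(c[0].strip()) == 0` test
def clEmpty (c : List String) : Bool := (PySem.Str.strip (c.headD "")).length == 0

-- Source B's inner while loop: split off the rest of the current run (key k) and the remainder
def runSplit (k : Bool) : List (List String) → List (List String) × List (List String)
  | [] => ([], [])
  | c :: rest =>
    if clEmpty c = k then
      let p := runSplit k rest
      (c :: p.1, p.2)
    else ([], c :: rest)

theorem runSplit_snd_length_le (k : Bool) : ∀ l : List (List String), ((runSplit k l).2).length ≤ l.length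
  | [] => Nat.le_refl _
  | c :: rest => by
    simp only [runSplit]
    split
    · exact Nat.le_succ_of_le (runSplit_snd_length_le k rest)
    · exact Nat.le_refl _

-- Source B's outer while loop, one iteration per run
def combineGo (acc : List (List String)) (l : List (List String)) : List (List String) :=
  match l with
  | [] => acc
  | c :: rest =>
    let k := clEmpty c
    let p := runSplit k rest
    let acc' := if k then (if acc = [] then acc else acc ++ [c]) else acc ++ (c :: p.1)
    combineGo acc' p.2
termination_by l.length
decreasing_by
  simpa using Nat.lt_succ_of_le (runSplit_snd_length_le _ rest)

def combine_multiple_empty_lines_to_one_alt (clusters : List (List String)) : List (List String) :=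
  combineGo [] clusters

-- ===== PRECONDITION & SPEC =====
-- Pre_ excludes inputs where some cluster has no lines at all: Python A raises IndexError indexing its first line
def Pre_combine_multiple_empty_lines_to_one (clusters : List (List String)) : Prop :=
  ∀ c ∈ clusters, c ≠ []
instance (clusters : List (List String)) : Decidable (Pre_combine_multiple_empty_lines_to_one clusters) := by unfold Pre_combine_multiple_empty_lines_to_one; infer_instance
def pvWitness_combine_multiple_empty_lines_to_one : List (List String) :=
  [["x"], [" "], [""], ["y z", "w"], ["\t"], ["a"]]

def Spec_combine_multiple_empty_lines_to_one (clusters : List (List String)) (out : List (List String)) : Prop := out = combine_multiple_empty_lines_to_one_alt clusters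
instance (clusters : List (List String)) (out : List (List String)) : Decidable (Spec_combine_multiple_empty_lines_to_one clusters out) := by unfold Spec_combine_multiple_empty_lines_to_one; infer_instance

-- ===== CLAIM (what is proved, stated in full; the proofs are below) =====
def Claim_equal_combine_multiple_empty_lines_to_one : Prop := ∀ (clusters : List (List String)), Dom_combine_multiple_empty_lines_to_one clusters → Pre_combine_multiple_empty_lines_to_one clusters → Spec_combine_multiple_empty_lines_to_one clusters (combine_multiple_empty_lines_to_one clusters)

-- ===== LEMMAS AND PROOFS =====

-- reference recursion: s = "something kept so far and the last kept cluster is non-empty"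
def specGo (s : Bool) : List (List String) → List (List String)
  | [] => []
  | c :: rest =>
    if clEmpty c then (if s then c :: specGo false rest else specGo s rest)
    else c :: specGo true rest

-- A's state read off the accumulator
def stateOf (acc : List (List String)) : Bool :=
  match acc.getLast? with
  | none => false
  | some c => !clEmpty c

theorem stateOf_append (acc : List (List String)) (c : List String) :
    stateOf (acc ++ [c]) = !clEmpty c := by
  simp [stateOf]

theorem A_fold (l : List (List String)) : ∀ acc,
    l.foldl
      (fun new_clusters cluster =>
        if (PySem.Str.strip (cluster.headD "")).length != 0 then
          new_clusters ++ [cluster]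
        else
          if new_clusters.isEmpty || ((PySem.Str.strip (((new_clusters.getLast?).getD []).headD "")).length == 0) then
            new_clusters
          else
            new_clusters ++ [cluster]) acc
    = acc ++ specGo (stateOf acc) l := by
  induction l with
  | nil => intro acc; simp [specGo]
  | cons c rest ih =>
    intro acc
    rw [List.foldl_cons]
    by_cases hk : clEmpty c
    · -- empty cluster: the `!= 0` branch is false
      have h1 : ((PySem.Str.strip (c.headD "")).length != 0) = false := by
        simpa [clEmpty] using hk
      by_cases hs : stateOf acc
      · -- last kept non-empty: appended
        obtain ⟨last, hlast⟩ : ∃ last, acc.getLast? = some last := by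
          cases h : acc.getLast? with
          | none => simp [stateOf, h] at hs
          | some last => exact ⟨last, rfl⟩
        have hlastNE : clEmpty last = false := by
          simp only [stateOf, hlast] at hs; simpa using hs
        have hne : acc.isEmpty = false := by
          cases acc with
          | nil => simp at hlast
          | cons a as => simp
        have h2 : (acc.isEmpty || ((PySem.Str.strip (((acc.getLast?).getD []).headD "")).length == 0)) = false := by
          simp only [hne, hlast, Option.getD_some, Bool.false_or]
          simpa [clEmpty] using hlastNE
        simp only [h1, h2, Bool.false_eq_true, Bool.true_eq_false, eq_self_iff_true, if_true, if_false]
        rw [ih (acc ++ [c])]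
        simp [specGo, hk, hs, stateOf_append]
      · -- nothing kept / last kept empty: skipped
        have hsf : stateOf acc = false := by simpa using hs
        have h2 : (acc.isEmpty || ((PySem.Str.strip (((acc.getLast?).getD []).headD "")).length == 0)) = true := by
          cases h : acc.getLast? with
          | none =>
            have : acc = [] := by
              cases acc with
              | nil => rfl
              | cons a as => simp [List.getLast?_eq_some_iff] at h
            simp [this]
          | some last =>
            have : clEmpty last = true := by
              simp only [stateOf, h] at hsf; simpa using hsf
            simp only [h, Option.getD_some, Bool.or_eq_true]
            right; simpa [clEmpty] using this
        simp only [h1, h2, Bool.false_eq_true, Bool.true_eq_false, eq_self_iff_true, if_true, if_false]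
        rw [ih acc]
        simp [specGo, hk, hsf]
    · -- non-empty cluster: appended unconditionally
      have h1 : ((PySem.Str.strip (c.headD "")).length != 0) = true := by
        simpa [clEmpty] using hk
      simp only [h1, Bool.false_eq_true, Bool.true_eq_false, eq_self_iff_true, if_true, if_false]
      rw [ih (acc ++ [c])]
      simp [specGo, hk, stateOf_append]

theorem runSplit_eq (k : Bool) : ∀ l : List (List String),
    (runSplit k l).1 ++ (runSplit k l).2 = l
    ∧ (∀ c ∈ (runSplit k l).1, clEmpty c = k)
    ∧ (∀ c r, (runSplit k l).2 = c :: r → clEmpty c = !k)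
  | [] => by simp [runSplit]
  | c :: rest => by
    obtain ⟨h1, h2, h3⟩ := runSplit_eq k rest
    simp only [runSplit]
    split
    · rename_i hck
      refine ⟨by simpa using h1, ?_, h3⟩
      intro d hd
      rcases List.mem_cons.mp hd with h | h
      · subst h; exact hck
      · exact h2 d h
    · rename_i hck
      refine ⟨rfl, by simp, ?_⟩
      intro d r hdr
      cases hdr
      revert hck
      cases clEmpty c <;> cases k <;> simp

-- specGo over a run of non-empty clusters: kept verbatim, state becomes true
theorem specGo_run_false : ∀ (g r : List (List String)), (∀ c ∈ g, clEmpty c = false) →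
    specGo true (g ++ r) = g ++ specGo true r
  | [], r, _ => rfl
  | c :: g, r, h => by
    have hc : clEmpty c = false := h c (by simp)
    simp only [List.cons_append, specGo, hc, Bool.false_eq_true, Bool.true_eq_false, eq_self_iff_true, if_true, if_false]
    rw [specGo_run_false g r (fun d hd => h d (by simp [hd]))]

-- specGo over a run of empty clusters with state false: all skipped
theorem specGo_run_true : ∀ (g r : List (List String)), (∀ c ∈ g, clEmpty c = true) →
    specGo false (g ++ r) = specGo false r
  | [], r, _ => rfl
  | c :: g, r, h => by
    have hc : clEmpty c = true := h c (by simp)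
    simp only [List.cons_append, specGo, hc, Bool.false_eq_true, Bool.true_eq_false, eq_self_iff_true, if_true, if_false]
    exact specGo_run_true g r (fun d hd => h d (by simp [hd]))

set_option maxHeartbeats 1600000 in
theorem combineGo_eq : ∀ (n : ℕ) (l acc : List (List String)) (s : Bool),
    l.length ≤ n →
    (acc = [] → s = false) →
    ((∀ c r, l = c :: r → clEmpty c = true → acc ≠ [] → s = true)) →
    combineGo acc l = acc ++ specGo s l := by
  intro n
  induction n with
  | zero =>
    intro l acc s hl _ _
    have : l = [] := List.length_eq_zero_iff.mp (Nat.le_zero.mp hl)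
    subst this
    simp [combineGo, specGo]
  | succ n ih =>
    intro l acc s hl hE hH
    cases l with
    | nil => simp [combineGo, specGo]
    | cons c rest =>
      obtain ⟨hsplit, hall, hhead⟩ := runSplit_eq (clEmpty c) rest
      have hlen : (runSplit (clEmpty c) rest).2.length ≤ n := by
        have := runSplit_snd_length_le (clEmpty c) rest
        simp only [List.length_cons] at hl
        omega
      rw [combineGo]
      by_cases hk : clEmpty c
      · -- empty run
        rw [hk] at hsplit hall hhead hlen
        simp only [hk, eq_self_iff_true, if_true]
        by_cases hacc : acc = []
        · have hs : s = false := hE hacc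
          subst hacc
          simp only [eq_self_iff_true, if_true]
          rw [ih (runSplit true rest).2 [] false hlen (fun _ => rfl)
              (fun d r hdr hd hne => absurd rfl hne)]
          have hsp : specGo s (c :: rest) = specGo false (runSplit true rest).2 := by
            rw [hs]
            conv_lhs => rw [show c :: rest = (c :: (runSplit true rest).1) ++ (runSplit true rest).2 by simp [hsplit]]
            exact specGo_run_true _ _ (by
              intro d hd
              rcases List.mem_cons.mp hd with h | h
              · subst h; exact hk
              · exact hall d h)
          simp [hsp]
        · have hs : s = true := hH c rest rfl hk hacc
          subst hs
          rw [if_neg hacc]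
          have hihH : ∀ (d : List String) (r : List (List String)),
              (runSplit true rest).2 = d :: r → clEmpty d = true → acc ++ [c] ≠ [] → false = true := by
            intro d r hdr hd _
            have := hhead d r hdr
            simp [this] at hd
          rw [ih (runSplit true rest).2 (acc ++ [c]) false hlen (by simp) hihH]
          have hsp : specGo true (c :: rest) = c :: specGo false (runSplit true rest).2 := by
            simp only [specGo, hk, eq_self_iff_true, if_true]
            conv_lhs => rw [← hsplit]
            exact congrArg _ (specGo_run_true _ _ (fun d hd => hall d hd))
          rw [hsp]
          simp
      · -- non-empty run
        have hkf : clEmpty c = false := by simpa using hk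
        rw [hkf] at hsplit hall hlen
        simp only [hkf, Bool.false_eq_true, if_false]
        rw [ih (runSplit false rest).2 (acc ++ (c :: (runSplit false rest).1)) true hlen
            (by simp) (fun _ _ _ _ _ => rfl)]
        have hsp : specGo s (c :: rest) = (c :: (runSplit false rest).1) ++ specGo true (runSplit false rest).2 := by
          simp only [specGo, hkf, Bool.false_eq_true, if_false]
          conv_lhs => rw [← hsplit]
          simp only [List.cons_append]
          exact congrArg _ (specGo_run_false _ _ hall)
        rw [hsp]
        simp

-- ===== VERDICT (by name: the statement is the Claim_ definition above) =====
theorem combine_multiple_empty_lines_to_one_spec : Claim_equal_combine_multiple_empty_lines_to_one := by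
  intro clusters _ _
  unfold Spec_combine_multiple_empty_lines_to_one
  unfold combine_multiple_empty_lines_to_one combine_multiple_empty_lines_to_one_alt
  rw [A_fold clusters []]
  rw [combineGo_eq clusters.length clusters [] false (Nat.le_refl _) (fun _ => rfl)
      (fun _ _ _ _ hne => absurd rfl hne)]
  simp [stateOf]
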